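-- pv_equiv track=rewrite | github.com/Jobin-Nelson/learn | competitive_programming/september/sum-of-even-numbers-after-queries.py | sumEventAfterQueries
-- ===== SOURCE A (Python) =====
-- def sumEventAfterQueries(nums: list[int], queries: list[list[int]]) -> list[int]:
--     even_sum = sum(n for n in nums if n % 2 == 0)
--     res = []
--
--     for val, ind in queries:
--         cur_num = nums[ind]
--         if cur_num % 2 == 0: even_sum -= cur_num
--         cur_num += val
--         if cur_num % 2 == 0: even_sum += cur_num
--         nums[ind] = cur_num
--         res.append(even_sum)
--     return res
-- ===== SOURCE B (Python) =====
-- def sumEventAfterQueries(nums: list[int], queries: list[list[int]]) -> list[int]: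
--     res = []
--     for val, ind in queries:
--         nums[ind] += val
--         res.append(sum(n for n in nums if n % 2 == 0))
--     return res
-- ===== Notes on version B (the rewrite author's own statement) =====
-- stated objective: simpler
-- what changed: B drops A's maintained incremental even_sum (subtract old, add new per query) and instead, after each in-place update, recomputes the even sum with a fresh full scan of nums.
import Mathlib
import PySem

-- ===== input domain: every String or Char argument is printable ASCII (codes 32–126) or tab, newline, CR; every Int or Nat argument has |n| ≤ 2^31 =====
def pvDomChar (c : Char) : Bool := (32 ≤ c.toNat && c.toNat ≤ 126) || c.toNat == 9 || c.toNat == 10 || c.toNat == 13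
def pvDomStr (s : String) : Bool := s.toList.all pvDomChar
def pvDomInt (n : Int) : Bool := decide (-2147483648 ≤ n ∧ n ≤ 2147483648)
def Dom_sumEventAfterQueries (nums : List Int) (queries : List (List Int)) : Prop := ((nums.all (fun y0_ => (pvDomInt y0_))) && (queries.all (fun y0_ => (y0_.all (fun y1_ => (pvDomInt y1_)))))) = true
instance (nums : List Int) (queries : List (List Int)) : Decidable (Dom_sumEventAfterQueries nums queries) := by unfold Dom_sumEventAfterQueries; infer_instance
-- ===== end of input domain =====

-- B recomputes the even sum with a full scan after each in-place update instead of
-- maintaining A's incremental even_sum.  Both mutate nums[ind] in Python; the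
-- equivalence proved here is about the RETURN value (the mutations are identical anyway).

-- ===== PORT A =====
-- step of A's loop over queries; state = (nums, even_sum, res)
def pvStepA (st : List Int × Int × List Int) (q : List Int) : List Int × Int × List Int :=
  let val := PySem.List.pyGetD q 0 0
  let ind := PySem.List.pyGetD q 1 0
  let cur := PySem.List.pyGetD st.1 ind 0
  let es := if cur % 2 = 0 then st.2.1 - cur else st.2.1
  let cur2 := cur + val
  let es2 := if cur2 % 2 = 0 then es + cur2 else es
  (PySem.List.pySetD st.1 ind cur2, es2, st.2.2 ++ [es2])

def sumEventAfterQueries (nums : List Int) (queries : List (List Int)) : List Int :=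
  let even_sum := nums.foldl (fun s n => if n % 2 = 0 then s + n else s) 0
  (queries.foldl pvStepA (nums, even_sum, ([] : List Int))).2.2

-- ===== PORT B =====
-- B: apply the query update in place, then a fresh full scan for the even sum
def pvGoB (ns : List Int) (qs : List (List Int)) : List Int :=
  match qs with
  | [] => []
  | q :: rest =>
    let ind := PySem.List.pyGetD q 1 0
    let ns' := PySem.List.pySetD ns ind (PySem.List.pyGetD ns ind 0 + PySem.List.pyGetD q 0 0)
    (ns'.filter (fun n => n % 2 = 0)).sum :: pvGoB ns' rest

def sumEventAfterQueries_alt (nums : List Int) (queries : List (List Int)) : List Int :=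
  pvGoB nums queries

-- ===== PRECONDITION & SPEC =====
-- A raises on a query of length ≠ 2 (unpacking ValueError) or an index outside
-- Python's range for nums (IndexError); Pre_ excludes exactly those inputs.
def Pre_sumEventAfterQueries (nums : List Int) (queries : List (List Int)) : Prop :=
  ∀ q ∈ queries, q.length = 2 ∧ PySem.Raise.InRange nums.length (PySem.List.pyGetD q 1 0)
instance (nums : List Int) (queries : List (List Int)) : Decidable (Pre_sumEventAfterQueries nums queries) := by
  unfold Pre_sumEventAfterQueries; infer_instance

def pvWitness_sumEventAfterQueries : List Int × List (List Int) := ([1, 2, 3], [[1, 0], [-3, 1], [4, -1]])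

def Spec_sumEventAfterQueries (nums : List Int) (queries : List (List Int)) (out : List Int) : Prop := out = sumEventAfterQueries_alt nums queries
instance (nums : List Int) (queries : List (List Int)) (out : List Int) : Decidable (Spec_sumEventAfterQueries nums queries out) := by unfold Spec_sumEventAfterQueries; infer_instance

-- ===== CLAIM (what is proved, stated in full; the proofs are below) =====
def Claim_equal_sumEventAfterQueries : Prop := ∀ (nums : List Int) (queries : List (List Int)), Dom_sumEventAfterQueries nums queries → Pre_sumEventAfterQueries nums queries → Spec_sumEventAfterQueries nums queries (sumEventAfterQueries nums queries)

-- ===== LEMMAS AND PROOFS =====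

-- the generator-sum of A's initial even_sum is the filter-sum B scans
theorem pvFoldEven (ns : List Int) (s : Int) :
    ns.foldl (fun s n => if n % 2 = 0 then s + n else s) s
      = s + (ns.filter (fun n => n % 2 = 0)).sum := by
  induction ns generalizing s with
  | nil => simp
  | cons a t ih =>
    simp only [List.foldl_cons, List.filter_cons, decide_eq_true_eq]
    by_cases h : a % 2 = 0
    · rw [if_pos h, if_pos h, List.sum_cons, ih]; ring
    · rw [if_neg h, if_neg h, ih]

-- even-sum after a point update, at a Nat index
theorem pvEvenSum_set (ns : List Int) (j : Nat) (v : Int) (hj : j < ns.length) :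
    ((ns.set j v).filter (fun n => n % 2 = 0)).sum
      = (ns.filter (fun n => n % 2 = 0)).sum
        - (if ns[j] % 2 = 0 then ns[j] else 0)
        + (if v % 2 = 0 then v else 0) := by
  induction ns generalizing j with
  | nil => simp at hj
  | cons a t ih =>
    cases j with
    | zero =>
      simp only [List.set_cons_zero, List.filter_cons, List.getElem_cons_zero,
        decide_eq_true_eq]
      by_cases ha : a % 2 = 0 <;> by_cases hv : v % 2 = 0 <;>
        simp only [ha, hv, if_pos, if_neg, List.sum_cons, not_false_iff] <;> ring
    | succ k =>
      have hk : k < t.length := by simpa using hj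
      simp only [List.set_cons_succ, List.filter_cons, List.getElem_cons_succ,
        decide_eq_true_eq]
      by_cases ha : a % 2 = 0
      · rw [if_pos ha, if_pos ha, List.sum_cons, List.sum_cons, ih k hk]; ring
      · rw [if_neg ha, if_neg ha, ih k hk]

-- under InRange, pyGetD and pySetD act at the same Nat index
theorem pvIdx_norm (ns : List Int) (i : Int) (v : Int)
    (h : PySem.Raise.InRange ns.length i) :
    ∃ j : Nat, ∃ _ : j < ns.length, PySem.List.pyGetD ns i 0 = ns[j]
      ∧ PySem.List.pySetD ns i v = ns.set j v := by
  obtain ⟨h1, h2⟩ := h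
  by_cases h0 : 0 ≤ i
  · refine ⟨i.toNat, by omega, ?_, ?_⟩
    · exact PySem.List.pyGetD_eq_getElem ns 0 h0 h2
    · simp [PySem.List.pySetD, PySem.List.pySet?, PySem.List.pyIdx?, h0, h2]
  · refine ⟨ns.length - (-i).toNat, by omega, ?_, ?_⟩
    · have hi : PySem.List.pyGetD ns (-(((-i).toNat : Nat) : Int)) 0
          = ns[ns.length - (-i).toNat]'(by omega) :=
        PySem.List.pyGetD_neg_natCast ns _ 0 (by omega) (by omega)
      rwa [show (-(((-i).toNat : Nat) : Int)) = i by omega] at hi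
    · simp [PySem.List.pySetD, PySem.List.pySet?, PySem.List.pyIdx?, h0, h1]

theorem pvMain (qs : List (List Int)) (ns : List Int) (es : Int) (res : List Int)
    (hpre : ∀ q ∈ qs, q.length = 2 ∧ PySem.Raise.InRange ns.length (PySem.List.pyGetD q 1 0))
    (hes : es = (ns.filter (fun n => n % 2 = 0)).sum) :
    (qs.foldl pvStepA (ns, es, res)).2.2 = res ++ pvGoB ns qs := by
  induction qs generalizing ns es res with
  | nil => simp [pvGoB]
  | cons q rest ih =>
    obtain ⟨-, hir⟩ := hpre q (List.mem_cons_self ..)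
    set ind := PySem.List.pyGetD q 1 0 with hind
    set cur := PySem.List.pyGetD ns ind 0 with hcur
    set cur2 := cur + PySem.List.pyGetD q 0 0 with hc2
    set es2 := (if cur2 % 2 = 0 then (if cur % 2 = 0 then es - cur else es) + cur2
                else (if cur % 2 = 0 then es - cur else es)) with hes2
    obtain ⟨j, hj, hget, hsetE⟩ := pvIdx_norm ns ind cur2 hir
    rw [← hcur] at hget
    have hstep : pvStepA (ns, es, res) q = (PySem.List.pySetD ns ind cur2, es2, res ++ [es2]) := rfl
    have hes' : es2 = ((ns.set j cur2).filter (fun n => n % 2 = 0)).sum := by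
      rw [pvEvenSum_set ns j cur2 hj, ← hes, ← hget, hes2]
      split_ifs <;> ring
    have hpre' : ∀ p ∈ rest, p.length = 2 ∧
        PySem.Raise.InRange (ns.set j cur2).length (PySem.List.pyGetD p 1 0) := by
      intro p hp
      obtain ⟨hl, hr⟩ := hpre p (List.mem_cons_of_mem _ hp)
      exact ⟨hl, by simpa using hr⟩
    have hB : pvGoB ns (q :: rest) = es2 :: pvGoB (ns.set j cur2) rest := by
      simp only [pvGoB, ← hind, ← hcur, ← hc2, hsetE, ← hes']
    rw [List.foldl_cons, hstep, hsetE, ih _ _ _ hpre' hes', hB]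
    simp

-- ===== VERDICT (by name: the statement is the Claim_ definition above) =====
theorem sumEventAfterQueries_spec : Claim_equal_sumEventAfterQueries := by
  intro nums queries _ hpre
  unfold Spec_sumEventAfterQueries sumEventAfterQueries sumEventAfterQueries_alt
  rw [pvFoldEven nums 0, pvMain queries nums _ [] hpre (by ring)]
  simp
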